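-- pv_equiv track=rewrite | github.com/ipeerbhai/nudge | src/nudge/http_server.py | is_origin_allowed
-- ===== SOURCE A (Python) =====
-- from typing import Callable, Dict, Any, Optional, Tuple
--
-- ALLOWED_ORIGINS = {
--     "http://localhost",
--     "https://localhost",
--     "http://127.0.0.1",
--     "https://127.0.0.1",
-- }
--
-- def is_origin_allowed(origin: Optional[str]) -> bool:
--     """
--     Check if an Origin header value is allowed.
--
--     Allows:
--     - No Origin header (non-browser requests)
--     - localhost and 127.0.0.1 with any port
--     """
--     if origin is None:
--         return True  # No Origin header is OK (non-browser requests)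
--
--     # Check exact matches first
--     if origin in ALLOWED_ORIGINS:
--         return True
--
--     # Check with port suffix
--     for allowed in ALLOWED_ORIGINS:
--         if origin.startswith(allowed + ":"):
--             return True
--
--     return False
-- ===== SOURCE B (Python) =====
-- from typing import Optional
--
-- def is_origin_allowed(origin: Optional[str]) -> bool:
--     """Parse the origin once (scheme, then host up to the first ':') instead of
--     looping over an allow-list of prefixes."""
--     if origin is None:
--         return True
--     if origin.startswith("http://"):
--         rest = origin[7:]
--     elif origin.startswith("https://"):
--         rest = origin[8:]
--     else:
--         return False
--     host = rest.split(":", 1)[0]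
--     return host in ("localhost", "127.0.0.1")
-- ===== Notes on version B (the rewrite author's own statement) =====
-- stated objective: simpler
-- what changed: B parses the origin once (peel the http/https scheme, then take the host up to the first ':') and checks scheme and host against component sets, instead of A's exact-match test plus a loop over four allow-list prefixes.
import Mathlib
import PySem

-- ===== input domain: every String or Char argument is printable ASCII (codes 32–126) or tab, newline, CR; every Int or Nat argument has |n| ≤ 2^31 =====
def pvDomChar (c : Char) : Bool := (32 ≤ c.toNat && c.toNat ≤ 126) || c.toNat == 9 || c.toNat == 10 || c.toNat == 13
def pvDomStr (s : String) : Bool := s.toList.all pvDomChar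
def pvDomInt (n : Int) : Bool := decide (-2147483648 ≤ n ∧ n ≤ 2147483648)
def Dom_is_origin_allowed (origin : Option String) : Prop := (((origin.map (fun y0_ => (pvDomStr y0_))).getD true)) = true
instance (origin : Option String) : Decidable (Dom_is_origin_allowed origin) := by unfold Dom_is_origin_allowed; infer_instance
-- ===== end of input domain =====

-- B replaces A's exact-match-plus-prefix loop over the allow-list by one structured parse
-- (peel the scheme, take the host up to the first ':'); objective: simpler.

-- ===== PORT A =====
def ALLOWED_ORIGINS : PySem.Set String :=
  PySem.Set.ofList ["http://localhost", "https://localhost", "http://127.0.0.1", "https://127.0.0.1"]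

def is_origin_allowed (origin : Option String) : Bool :=
  match origin with
  | none => true                         -- No Origin header is OK
  | some o =>
    if PySem.Set.contains ALLOWED_ORIGINS o then true      -- exact matches
    else if ALLOWED_ORIGINS.any (fun allowed => PySem.Str.startswith o (allowed ++ ":")) then true
    else false

-- ===== PORT B =====
-- host = rest.split(":", 1)[0]; host in ("localhost", "127.0.0.1")
def pvHostAllowed (rest : String) : Bool :=
  let host := (((PySem.Str.splitMax? rest ":" 1).getD []).headD "")
  host == "localhost" || host == "127.0.0.1"

def is_origin_allowed_alt (origin : Option String) : Bool :=
  match origin with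
  | none => true
  | some o =>
    if PySem.Str.startswith o "http://" then
      pvHostAllowed (PySem.Str.slice o (some 7) none)      -- origin[7:]
    else if PySem.Str.startswith o "https://" then
      pvHostAllowed (PySem.Str.slice o (some 8) none)      -- origin[8:]
    else false

-- ===== PRECONDITION & SPEC =====
def Spec_is_origin_allowed (origin : Option String) (out : Bool) : Prop := out = is_origin_allowed_alt origin
instance (origin : Option String) (out : Bool) : Decidable (Spec_is_origin_allowed origin out) := by unfold Spec_is_origin_allowed; infer_instance

-- ===== CLAIM (what is proved, stated in full; the proofs are below) =====
def Claim_equal_is_origin_allowed : Prop := ∀ (origin : Option String), Dom_is_origin_allowed origin → Spec_is_origin_allowed origin (is_origin_allowed origin)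

-- ===== LEMMAS AND PROOFS =====

-- the split loop with maxsplit already 0 returns one more piece appended to acc
lemma pv_go0 (fuel : ℕ) (l cur a : List Char) :
    ∃ w, PySem.Chars.splitOnMax.go [':'] fuel 0 l cur [a] = [a, w] := by
  cases fuel <;> cases l <;> simp [PySem.Chars.splitOnMax.go]

-- head of the split with maxsplit 1: everything up to the first ':'
lemma pv_go1 (fuel : ℕ) : ∀ (l cur : List Char), l.length < fuel →
    ∃ tl, PySem.Chars.splitOnMax.go [':'] fuel 1 l cur [] =
      (cur.reverse ++ l.takeWhile (fun c => c != ':')) :: tl := by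
  induction fuel with
  | zero => intro l cur h; omega
  | succ n ih =>
    intro l cur h
    cases l with
    | nil => exact ⟨[], by simp [PySem.Chars.splitOnMax.go]⟩
    | cons c rest =>
      by_cases hc : c = ':'
      · subst hc
        obtain ⟨w, hw⟩ := pv_go0 n rest [] cur.reverse
        exact ⟨[w], by simp [PySem.Chars.splitOnMax.go, hw]⟩
      · obtain ⟨tl, htl⟩ := ih rest (c :: cur) (by simpa using Nat.lt_of_succ_lt_succ h)
        refine ⟨tl, ?_⟩
        simp only [PySem.Chars.splitOnMax.go, List.isPrefixOf, htl]
        rw [if_neg (by omega), if_neg (by simp [Ne.symm hc])]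
        simp [show (c != ':') = true by simpa using hc]

lemma pv_splitOnMax_head (r : List Char) :
    ∃ tl, PySem.Chars.splitOnMax r [':'] 1 = (r.takeWhile (fun c => c != ':')) :: tl := by
  have := pv_go1 (r.length + 1) r [] (by omega)
  simpa [PySem.Chars.splitOnMax] using this

-- B's host test, in terms of takeWhile on the character list
lemma pv_hostAllowed (rest : String) :
    pvHostAllowed rest = true ↔
      (rest.toList.takeWhile (fun c => c != ':') = "localhost".toList ∨
       rest.toList.takeWhile (fun c => c != ':') = "127.0.0.1".toList) := by
  obtain ⟨tl, htl⟩ := pv_splitOnMax_head rest.toList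
  have hsep : (":" : String).toList = [':'] := by decide
  simp only [pvHostAllowed, PySem.Str.splitMax?, hsep, PySem.Chars.splitMax?]
  simp [htl, String.ext_iff]

-- characterize r.takeWhile (≠ ':') = h for a colon-free h
lemma pv_dropWhile_head (p : Char → Bool) : ∀ (r : List Char) (c : Char) (d : List Char),
    r.dropWhile p = c :: d → p c = false := by
  intro r
  induction r with
  | nil => intro c d h; simp at h
  | cons x xs ih =>
    intro c d h
    by_cases hx : p x
    · exact ih c d (by simpa [List.dropWhile, hx] using h)
    · rw [List.dropWhile_cons_of_neg (by simpa using hx)] at h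
      cases h; simpa using hx

lemma pv_takeWhile_append_colon (h t : List Char) (hh : ∀ c ∈ h, (c != ':') = true) :
    (h ++ ':' :: t).takeWhile (fun c => c != ':') = h := by
  induction h with
  | nil => simp
  | cons x xs ih =>
    have hx := hh x (by simp)
    simp only [List.cons_append, List.takeWhile_cons, hx, if_pos]
    simp [ih (fun c hc => hh c (by simp [hc]))]

lemma pv_takeWhile_eq_iff (h r : List Char) (hh : ∀ c ∈ h, (c != ':') = true) :
    r.takeWhile (fun c => c != ':') = h ↔ (r = h ∨ (h ++ [':']) <+: r) := by
  constructor
  · intro he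
    have hsp := (List.takeWhile_append_dropWhile (p := fun c => c != ':') (l := r)).symm
    rw [he] at hsp
    cases hd : r.dropWhile (fun c => c != ':') with
    | nil => left; rw [hsp, hd]; simp
    | cons c d =>
      have hc := pv_dropWhile_head _ r c d hd
      have : c = ':' := by simpa using hc
      subst this
      right
      exact ⟨d, by rw [hsp, hd]; simp⟩
  · rintro (rfl | ⟨t, rfl⟩)
    · exact List.takeWhile_eq_self_iff.mpr hh
    · have : h ++ [':'] ++ t = h ++ ':' :: t := by simp
      rw [this, pv_takeWhile_append_colon h t hh]

-- the central character-level equivalence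
lemma pv_main (l : List Char) :
    (l = ['h','t','t','p',':','/','/','l','o','c','a','l','h','o','s','t'] ∨
     l = ['h','t','t','p','s',':','/','/','l','o','c','a','l','h','o','s','t'] ∨
     l = ['h','t','t','p',':','/','/','1','2','7','.','0','.','0','.','1'] ∨
     l = ['h','t','t','p','s',':','/','/','1','2','7','.','0','.','0','.','1'] ∨
     (['h','t','t','p',':','/','/','l','o','c','a','l','h','o','s','t',':'] <+: l) ∨
     (['h','t','t','p','s',':','/','/','l','o','c','a','l','h','o','s','t',':'] <+: l) ∨
     (['h','t','t','p',':','/','/','1','2','7','.','0','.','0','.','1',':'] <+: l) ∨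
     (['h','t','t','p','s',':','/','/','1','2','7','.','0','.','0','.','1',':'] <+: l)) ↔
    (if ['h','t','t','p',':','/','/'] <+: l then
       (l.drop 7).takeWhile (fun c => c != ':') = ['l','o','c','a','l','h','o','s','t'] ∨
       (l.drop 7).takeWhile (fun c => c != ':') = ['1','2','7','.','0','.','0','.','1']
     else if ['h','t','t','p','s',':','/','/'] <+: l then
       (l.drop 8).takeWhile (fun c => c != ':') = ['l','o','c','a','l','h','o','s','t'] ∨
       (l.drop 8).takeWhile (fun c => c != ':') = ['1','2','7','.','0','.','0','.','1']
     else False) := by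
  by_cases h7 : ['h','t','t','p',':','/','/'] <+: l
  · obtain ⟨r, rfl⟩ := h7
    rw [if_pos (List.prefix_append _ _)]
    simp only [List.cons_append, List.nil_append, List.drop_succ_cons, List.drop_zero]
    rw [pv_takeWhile_eq_iff ['l','o','c','a','l','h','o','s','t'] r (by simp),
        pv_takeWhile_eq_iff ['1','2','7','.','0','.','0','.','1'] r (by simp)]
    simp only [List.cons_prefix_cons, List.cons.injEq, List.cons_append, List.nil_append]
    simp
    tauto
  · by_cases h8 : ['h','t','t','p','s',':','/','/'] <+: l
    · obtain ⟨r, rfl⟩ := h8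
      rw [if_neg (by revert h7; simp [List.cons_prefix_cons]), if_pos (List.prefix_append _ _)]
      simp only [List.cons_append, List.nil_append, List.drop_succ_cons, List.drop_zero]
      rw [pv_takeWhile_eq_iff ['l','o','c','a','l','h','o','s','t'] r (by simp),
          pv_takeWhile_eq_iff ['1','2','7','.','0','.','0','.','1'] r (by simp)]
      simp only [List.cons_prefix_cons, List.cons.injEq, List.cons_append, List.nil_append]
      simp
      tauto
    · rw [if_neg h7, if_neg h8]
      simp only [iff_false]
      rintro (rfl | rfl | rfl | rfl | h | h | h | h)
      · exact h7 (by decide)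
      · exact h8 (by decide)
      · exact h7 (by decide)
      · exact h8 (by decide)
      · exact h7 ((by decide : ['h','t','t','p',':','/','/'] <+: ['h','t','t','p',':','/','/','l','o','c','a','l','h','o','s','t',':']).trans h)
      · exact h8 ((by decide : ['h','t','t','p','s',':','/','/'] <+: ['h','t','t','p','s',':','/','/','l','o','c','a','l','h','o','s','t',':']).trans h)
      · exact h7 ((by decide : ['h','t','t','p',':','/','/'] <+: ['h','t','t','p',':','/','/','1','2','7','.','0','.','0','.','1',':']).trans h)
      · exact h8 ((by decide : ['h','t','t','p','s',':','/','/'] <+: ['h','t','t','p','s',':','/','/','1','2','7','.','0','.','0','.','1',':']).trans h)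

-- A on a string, as a disjunction over the four origins
lemma pv_A_some (o : String) :
    is_origin_allowed (some o) = true ↔
      (o.toList = "http://localhost".toList ∨
       o.toList = "https://localhost".toList ∨
       o.toList = "http://127.0.0.1".toList ∨
       o.toList = "https://127.0.0.1".toList ∨
       ("http://localhost:".toList <+: o.toList) ∨
       ("https://localhost:".toList <+: o.toList) ∨
       ("http://127.0.0.1:".toList <+: o.toList) ∨
       ("https://127.0.0.1:".toList <+: o.toList)) := by
  have hA : ALLOWED_ORIGINS = ["http://localhost", "https://localhost", "http://127.0.0.1", "https://127.0.0.1"] := by decide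
  have c1 : ("http://localhost" ++ ":" : String) = "http://localhost:" := by decide
  have c2 : ("https://localhost" ++ ":" : String) = "https://localhost:" := by decide
  have c3 : ("http://127.0.0.1" ++ ":" : String) = "http://127.0.0.1:" := by decide
  have c4 : ("https://127.0.0.1" ++ ":" : String) = "https://127.0.0.1:" := by decide
  simp only [is_origin_allowed, hA, PySem.Set.contains, List.any_cons, List.any_nil, c1, c2, c3, c4,
    PySem.Str.startswith_eq, PySem.Chars.startswith]
  constructor
  · intro h
    split_ifs at h with h1 h2
    · simp only [List.contains_eq_mem, List.mem_cons, List.not_mem_nil, or_false, decide_eq_true_eq] at h1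
      rcases h1 with rfl | rfl | rfl | rfl
      · exact Or.inl rfl
      · exact Or.inr (Or.inl rfl)
      · exact Or.inr (Or.inr (Or.inl rfl))
      · exact Or.inr (Or.inr (Or.inr (Or.inl rfl)))
    · simp only [Bool.or_eq_true, List.isPrefixOf_iff_prefix] at h2
      rcases h2 with h2 | h2 | h2 | h2 | h2
      · exact Or.inr (Or.inr (Or.inr (Or.inr (Or.inl h2))))
      · exact Or.inr (Or.inr (Or.inr (Or.inr (Or.inr (Or.inl h2)))))
      · exact Or.inr (Or.inr (Or.inr (Or.inr (Or.inr (Or.inr (Or.inl h2))))))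
      · exact Or.inr (Or.inr (Or.inr (Or.inr (Or.inr (Or.inr (Or.inr h2))))))
      · exact absurd h2 (by simp)
  · intro h
    split_ifs with h1 h2
    · rfl
    · rfl
    · exfalso
      simp only [List.contains_eq_mem, List.mem_cons, List.not_mem_nil, or_false,
        decide_eq_true_eq, not_or] at h1
      simp only [Bool.or_eq_true, List.isPrefixOf_iff_prefix, not_or] at h2
      rcases h with h | h | h | h | h | h | h | h
      · exact h1.1 (String.toList_inj.mp h)
      · exact h1.2.1 (String.toList_inj.mp h)
      · exact h1.2.2.1 (String.toList_inj.mp h)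
      · exact h1.2.2.2 (String.toList_inj.mp h)
      · exact absurd h (by simpa [List.isPrefixOf_iff_prefix] using h2.1)
      · exact absurd h (by simpa [List.isPrefixOf_iff_prefix] using h2.2.1)
      · exact absurd h (by simpa [List.isPrefixOf_iff_prefix] using h2.2.2.1)
      · exact absurd h (by simpa [List.isPrefixOf_iff_prefix] using h2.2.2.2)

lemma pv_B_some (o : String) :
    is_origin_allowed_alt (some o) = true ↔
      (if "http://".toList <+: o.toList then
         (o.toList.drop 7).takeWhile (fun c => c != ':') = "localhost".toList ∨
         (o.toList.drop 7).takeWhile (fun c => c != ':') = "127.0.0.1".toList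
       else if "https://".toList <+: o.toList then
         (o.toList.drop 8).takeWhile (fun c => c != ':') = "localhost".toList ∨
         (o.toList.drop 8).takeWhile (fun c => c != ':') = "127.0.0.1".toList
       else False) := by
  have h7 : (PySem.Str.slice o (some 7) none).toList = o.toList.drop 7 := by
    simp [pysem]
  have h8 : (PySem.Str.slice o (some 8) none).toList = o.toList.drop 8 := by
    simp [pysem]
  simp only [is_origin_allowed_alt, PySem.Str.startswith_eq, PySem.Chars.startswith,
    List.isPrefixOf_iff_prefix]
  split_ifs with g7 g8
  · rw [← h7]; exact pv_hostAllowed _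
  · rw [← h8]; exact pv_hostAllowed _
  · simp

-- ===== VERDICT (by name: the statement is the Claim_ definition above) =====
theorem is_origin_allowed_spec : Claim_equal_is_origin_allowed := by
  intro origin _
  unfold Spec_is_origin_allowed
  cases origin with
  | none => rfl
  | some o =>
    rw [Bool.eq_iff_iff, pv_A_some, pv_B_some]
    have := pv_main o.toList
    simpa using this
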